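-- pv_equiv track=rewrite | github.com/AllanKoder/Competitive-Programming-Training | algorithms/test2.py | get_best_even_sum
-- ===== SOURCE A (Python) =====
-- def get_best_even_sum(array):
--     array.sort(reverse=True)
--     smallest_odd = float('inf')
--     best = 0
--
--     # If it is a positive small odd, sub it
--     # If it is a negative small odd, sub the abs of it
--     for n in array:
--         if n > 0:
--             best += n
--             if n % 2 != 0:
--                 smallest_odd = min(smallest_odd, n)
--         if n % 2 != 0:
--             if abs(n) < smallest_odd:
--                 smallest_odd = abs(n)
--                 break
--
--     if best % 2 == 0:
--         return best
--     else:
--         return best - smallest_odd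
-- ===== SOURCE B (Python) =====
-- # Alternative: staged comprehension passes instead of sort+scan-with-break —
-- # sum the positives; if that sum is odd, subtract the minimum absolute value
-- # among the odd elements. (A sorts `array` in place; B does not mutate it —
-- # the equivalence is about the return value.)
-- def get_best_even_sum(array):
--     best = sum(n for n in array if n > 0)
--     if best % 2 == 0:
--         return best
--     return best - min(abs(n) for n in array if n % 2 != 0)
-- ===== Notes on version B (the rewrite author's own statement) =====
-- stated objective: alternative
-- what changed: Replaces the in-place sort plus scan-with-break by two loop-free comprehension passes: the sum of positive elements, and (only when that sum is odd) the minimum absolute value among odd elements; the input is not mutated.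
import Mathlib
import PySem

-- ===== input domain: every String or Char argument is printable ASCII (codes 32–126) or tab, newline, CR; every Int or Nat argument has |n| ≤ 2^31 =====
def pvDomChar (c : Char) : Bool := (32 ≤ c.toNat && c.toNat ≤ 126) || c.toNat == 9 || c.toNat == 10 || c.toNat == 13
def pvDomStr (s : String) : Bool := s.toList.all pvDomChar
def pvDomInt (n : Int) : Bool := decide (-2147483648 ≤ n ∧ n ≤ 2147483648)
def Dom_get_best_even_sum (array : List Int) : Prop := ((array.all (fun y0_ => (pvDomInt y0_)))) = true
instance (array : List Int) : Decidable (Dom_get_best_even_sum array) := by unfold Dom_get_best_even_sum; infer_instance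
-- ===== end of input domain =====

-- B replaces A's in-place sort plus scan-with-break by two loop-free comprehension
-- passes (sum of positives; min |odd element| only when needed); equivalence is about
-- the RETURN value only: A sorts its argument in place, B does not mutate it.

-- ===== PORT A =====
-- smallest_odd is float('inf') or an int: Option Int, none = inf
def pvMinInf (so : Option Int) (v : Int) : Option Int :=
  match so with | none => some v | some w => some (min w v)
def pvLtInf (v : Int) (so : Option Int) : Bool :=
  match so with | none => true | some w => decide (v < w)

-- the for-loop with its break; state = (best, smallest_odd)
def pvLoopA : List Int → Int → Option Int → Int × Option Int
  | [], best, so => (best, so)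
  | n :: rest, best, so =>
    let best := if 0 < n then best + n else best
    let so := if 0 < n ∧ PySem.Int.mod n 2 ≠ 0 then pvMinInf so n else so
    if PySem.Int.mod n 2 ≠ 0 ∧ pvLtInf |n| so then (best, some |n|)  -- break
    else pvLoopA rest best so

def get_best_even_sum (array : List Int) : Int :=
  let arr := PySem.List.sorted array (fun x => x) true
  let r := pvLoopA arr 0 none
  -- 'best - smallest_odd' with smallest_odd still inf never happens (best odd ⇒ a
  -- positive odd was summed); .getD 0 stands for that dead branch
  if PySem.Int.mod r.1 2 = 0 then r.1 else r.1 - r.2.getD 0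

-- ===== PORT B =====
def get_best_even_sum_alt (array : List Int) : Int :=
  let best := (array.filter (fun n => decide (0 < n))).sum
  if PySem.Int.mod best 2 = 0 then best
  else
    -- min(...) over the odd elements' absolute values; when best is odd this list is
    -- nonempty (a positive odd was summed), so Python's min never raises; .getD 0
    -- stands for that dead branch
    best - (PySem.List.min?
      ((array.filter (fun n => decide (PySem.Int.mod n 2 ≠ 0))).map (fun n => |n|))
      (fun x => x)).getD 0

-- ===== PRECONDITION & SPEC =====
def Spec_get_best_even_sum (array : List Int) (out : Int) : Prop := out = get_best_even_sum_alt array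
instance (array : List Int) (out : Int) : Decidable (Spec_get_best_even_sum array out) := by unfold Spec_get_best_even_sum; infer_instance

-- ===== CLAIM (what is proved, stated in full; the proofs are below) =====
def Claim_equal_get_best_even_sum : Prop := ∀ (array : List Int), Dom_get_best_even_sum array → Spec_get_best_even_sum array (get_best_even_sum array)

-- ===== LEMMAS AND PROOFS =====

-- min on Option Int with none = +inf
def omin : Option Int → Option Int → Option Int
  | none, b => b
  | some v, none => some v
  | some v, some w => some (min v w)

-- closed forms of A's loop state: sum of positives, min |odd element|
def sumPos (l : List Int) : Int := (l.filter (fun n => decide (0 < n))).sum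
def oddmin (l : List Int) : Option Int :=
  l.foldr (fun n acc => if n % 2 = 1 then omin (some |n|) acc else acc) none

-- Python's 'n % 2 != 0' in normal form
lemma podd (n : Int) : PySem.Int.mod n 2 ≠ 0 ↔ n % 2 = 1 := by
  rw [PySem.Int.mod_eq_emod_of_pos (by norm_num)]
  omega

lemma omin_assoc (a b c : Option Int) : omin (omin a b) c = omin a (omin b c) := by
  cases a <;> cases b <;> cases c <;> simp [omin, min_assoc]

lemma omin_comm (a b : Option Int) : omin a b = omin b a := by
  cases a <;> cases b <;> simp [omin, min_comm]

lemma omin_none_right (a : Option Int) : omin a none = a := by cases a <;> rfl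

lemma oddmin_cons (n : Int) (l : List Int) :
    oddmin (n :: l) = if n % 2 = 1 then omin (some |n|) (oddmin l) else oddmin l := rfl

lemma pvMinInf_eq (so : Option Int) (v : Int) : pvMinInf so v = omin so (some v) := by
  cases so <;> rfl

lemma sumPos_cons (n : Int) (l : List Int) :
    sumPos (n :: l) = (if 0 < n then n else 0) + sumPos l := by
  by_cases h : 0 < n <;> simp [sumPos, h]

lemma sumPos_eq_zero {l : List Int} (h : ∀ m ∈ l, ¬ 0 < m) : sumPos l = 0 := by
  have : l.filter (fun n => decide (0 < n)) = [] := by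
    rw [List.filter_eq_nil_iff]; intro a ha; simpa using h a ha
  simp [sumPos, this]

lemma oddmin_ge (l : List Int) (c : Int)
    (h : ∀ m ∈ l, m % 2 = 1 → c ≤ |m|) :
    omin (some c) (oddmin l) = some c := by
  induction l with
  | nil => rfl
  | cons m rest ih =>
    have hrest : ∀ x ∈ rest, x % 2 = 1 → c ≤ |x| :=
      fun x hx => h x (List.mem_cons_of_mem _ hx)
    rw [oddmin_cons]
    by_cases hm : m % 2 = 1
    · have hc : c ≤ |m| := h m (List.mem_cons_self) hm
      rw [if_pos hm, ← omin_assoc]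
      have h2 : omin (some c) (some |m|) = some c := by simp [omin, min_eq_left hc]
      rw [h2, ih hrest]
    · rw [if_neg hm]; exact ih hrest

lemma odd_neg_abs {n m : Int} (hn : ¬ 0 < n) (hnodd : n % 2 = 1)
    (hm : m ≤ n) : |n| ≤ |m| := by
  have h0 : n ≠ 0 := by rintro rfl; simp at hnodd
  have h1 : n < 0 := by omega
  rw [abs_of_neg h1, abs_of_neg (by omega)]; omega

lemma loopA_spec (l : List Int) (hs : l.Pairwise (fun a b => b ≤ a)) : ∀ best so,
    pvLoopA l best so = (best + sumPos l, omin so (oddmin l)) := by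
  induction l with
  | nil => intro best so; simp [pvLoopA, sumPos, oddmin, omin_none_right]
  | cons n rest ih =>
    intro best so
    rcases List.pairwise_cons.mp hs with ⟨hhead, htail⟩
    rw [pvLoopA]
    by_cases ho : n % 2 = 1
    · by_cases hn : 0 < n
      · -- positive odd: smallest_odd := min(so, n); the break test cannot fire
        have habs : |n| = n := abs_of_pos hn
        have hbreak : pvLtInf |n| (pvMinInf so n) = false := by
          cases so <;> simp [pvLtInf, pvMinInf, habs]
        simp only [hn, ho, podd, ne_eq, if_true, and_self, hbreak, Bool.false_eq_true,
          if_false, not_false_eq_true, and_false]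
        rw [ih htail, sumPos_cons, oddmin_cons, pvMinInf_eq]
        simp only [hn, ho, if_true, Prod.mk.injEq]
        exact ⟨by ring, by rw [omin_assoc, habs]⟩
      · -- non-positive odd n: everything after n is non-positive
        have hrest0 : ∀ m ∈ rest, ¬ 0 < m := fun m hm => by
          have := hhead m hm; omega
        have hge : ∀ m ∈ rest, m % 2 = 1 → |n| ≤ |m| :=
          fun m hm _ => odd_neg_abs hn ho (hhead m hm)
        by_cases hb : pvLtInf |n| so
        · -- the break: nothing positive remains, |n| is the least |odd|
          simp only [hn, ho, podd, ne_eq, hb, if_true, and_self, if_false,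
            not_false_eq_true, false_and, and_true]
          rw [sumPos_cons, oddmin_cons]
          simp only [hn, ho, if_true, if_false, sumPos_eq_zero hrest0, Prod.mk.injEq]
          rw [oddmin_ge rest _ hge]
          refine ⟨by ring, ?_⟩
          cases so with
          | none => rfl
          | some w =>
            have hlt : |n| < w := by simpa [pvLtInf] using hb
            simp [omin, min_eq_right (le_of_lt hlt)]
        · simp only [hn, ho, podd, ne_eq, hb, if_true, and_self, if_false,
            not_false_eq_true, false_and, and_true, Bool.false_eq_true]
          rw [ih htail, sumPos_cons, oddmin_cons]
          simp only [hn, ho, if_true, if_false, true_and, and_false, Prod.mk.injEq]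
          refine ⟨by ring, ?_⟩
          cases so with
          | none => simp [pvLtInf] at hb
          | some w =>
            have hw : w ≤ |n| := by
              have h3 : ¬ |n| < w := by simpa [pvLtInf] using hb
              omega
            rw [← omin_assoc]
            have h4 : omin (some w) (some |n|) = some w := by simp [omin, min_eq_left hw]
            rw [h4]
    · by_cases hn : 0 < n
      · simp only [hn, ho, podd, ne_eq, if_true, if_false, not_true_eq_false, and_false,
          false_and, Bool.false_eq_true, not_false_eq_true]
        rw [ih htail, sumPos_cons, oddmin_cons]
        simp only [hn, ho, if_true, if_false, Prod.mk.injEq]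
        exact ⟨by ring, trivial⟩
      · simp only [hn, ho, podd, ne_eq, if_true, if_false, not_true_eq_false, and_false,
          false_and, Bool.false_eq_true, not_false_eq_true]
        rw [ih htail, sumPos_cons, oddmin_cons]
        simp only [hn, ho, if_true, if_false, Prod.mk.injEq]
        exact ⟨by ring, trivial⟩

lemma oddmin_perm {l₁ l₂ : List Int} (h : l₁.Perm l₂) : oddmin l₁ = oddmin l₂ := by
  induction h with
  | nil => rfl
  | cons x _ ih => rw [oddmin_cons, oddmin_cons, ih]
  | swap x y l =>
    rw [oddmin_cons, oddmin_cons, oddmin_cons, oddmin_cons]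
    by_cases hx : x % 2 = 1 <;> by_cases hy : y % 2 = 1 <;>
      simp only [hx, hy, if_true, if_false, ← omin_assoc, omin_comm (some |x|) (some |y|)]
  | trans _ _ ih1 ih2 => exact ih1.trans ih2

lemma sumPos_perm {l₁ l₂ : List Int} (h : l₁.Perm l₂) : sumPos l₁ = sumPos l₂ :=
  ((h.filter _).sum_eq)

-- B's min? over |odds| is exactly A's closed-form oddmin
lemma foldl_min_pull (s : List Int) : ∀ a b, s.foldl min (min a b) = min a (s.foldl min b) := by
  induction s with
  | nil => intro a b; rfl
  | cons y t ih =>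
    intro a b
    simp only [List.foldl_cons]
    rw [min_assoc, ih]

lemma min?_eq_foldr (l : List Int) :
    PySem.List.min? l (fun x => x) = l.foldr (fun n acc => omin (some n) acc) none := by
  induction l with
  | nil => rfl
  | cons x t ih =>
    rw [PySem.List.min?_id_cons, List.foldr_cons, ← ih]
    cases t with
    | nil => rfl
    | cons y s =>
      rw [PySem.List.min?_id_cons]
      show some ((y :: s).foldl min x) = omin (some x) (some (s.foldl min y))
      simp only [List.foldl_cons, omin]
      rw [foldl_min_pull]

lemma oddmin_eq_min? (l : List Int) :
    PySem.List.min?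
      ((l.filter (fun n => decide (PySem.Int.mod n 2 ≠ 0))).map (fun n => |n|))
      (fun x => x) = oddmin l := by
  rw [min?_eq_foldr]
  induction l with
  | nil => rfl
  | cons n t ih =>
    rw [oddmin_cons]
    by_cases h : n % 2 = 1
    · have hd : decide (PySem.Int.mod n 2 ≠ 0) = true := by
        simp only [decide_eq_true_eq]; exact (podd n).mpr h
      have e1 : List.filter (fun m => decide (PySem.Int.mod m 2 ≠ 0)) (n :: t)
          = n :: List.filter (fun m => decide (PySem.Int.mod m 2 ≠ 0)) t :=
        List.filter_cons_of_pos hd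
      rw [e1, List.map_cons, List.foldr_cons, ih, if_pos h]
    · have hd : ¬ decide (PySem.Int.mod n 2 ≠ 0) = true := by
        simp only [decide_eq_true_eq, ne_eq, not_not]
        by_contra hc; exact h ((podd n).mp hc)
      have e1 : List.filter (fun m => decide (PySem.Int.mod m 2 ≠ 0)) (n :: t)
          = List.filter (fun m => decide (PySem.Int.mod m 2 ≠ 0)) t :=
        List.filter_cons_of_neg hd
      rw [e1, ih, if_neg h]

-- ===== VERDICT (by name: the statement is the Claim_ definition above) =====
theorem get_best_even_sum_spec : Claim_equal_get_best_even_sum := by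
  intro array _
  show get_best_even_sum array = get_best_even_sum_alt array
  have hperm := PySem.List.sorted_perm array (fun x => x) true
  have hpw := PySem.List.sorted_pairwise_rev array (fun x => x)
  rw [get_best_even_sum, get_best_even_sum_alt,
      loopA_spec _ hpw, sumPos_perm hperm, oddmin_perm hperm, oddmin_eq_min?]
  simp [sumPos, omin]
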